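-- pv_equiv track=rewrite | github.com/nicotine-plus/nicotine-plus | pynicotine/gtkgui/search.py | check_country
-- ===== SOURCE A (Python) =====
-- def check_country(result_filter, value):
--
--     allowed = False
--
--     for country_code in result_filter:
--         if country_code == value:
--             allowed = True
--
--         elif country_code.startswith("!") and country_code[1:] != value:
--             allowed = True
--
--         elif country_code.startswith("!") and country_code[1:] == value:
--             return False
--
--     return allowed
-- ===== SOURCE B (Python) =====
-- def check_country(result_filter, value):
--     negated = [c[1:] for c in result_filter if c.startswith("!")]
--     if value in negated:
--         return False
--     return value in result_filter or any(c != value for c in negated)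
-- ===== Notes on version B (the rewrite author's own statement) =====
-- stated objective: simpler
-- what changed: Replaces the single interleaved loop with mutable flag and early return by a decomposition: build the list of negated entries once, then answer with a membership test (value among negated tails -> False) and two plain existence checks (value present, or some negated tail differs).
import Mathlib
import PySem

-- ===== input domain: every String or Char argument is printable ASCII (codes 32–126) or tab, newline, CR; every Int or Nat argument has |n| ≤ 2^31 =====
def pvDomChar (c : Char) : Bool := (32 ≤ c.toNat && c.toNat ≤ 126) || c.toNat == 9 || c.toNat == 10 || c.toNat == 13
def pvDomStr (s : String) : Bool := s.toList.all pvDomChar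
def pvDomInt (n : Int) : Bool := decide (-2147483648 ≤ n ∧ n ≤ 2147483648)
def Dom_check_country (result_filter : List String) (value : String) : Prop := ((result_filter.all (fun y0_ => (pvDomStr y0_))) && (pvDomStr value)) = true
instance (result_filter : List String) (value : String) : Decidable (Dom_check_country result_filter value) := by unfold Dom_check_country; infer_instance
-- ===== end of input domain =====

-- B replaces A's interleaved loop (mutable flag + early return) by one pass collecting the
-- negated entries, then a membership test and two existence checks; objective: simpler.

-- ===== PORT A =====
-- the for-loop with 'allowed' accumulator and early 'return False'
def check_country_go (value : String) (allowed : Bool) : List String → Bool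
  | [] => allowed
  | country_code :: rest =>
    if country_code == value then check_country_go value true rest
    else if PySem.Str.startswith country_code "!" &&
            (PySem.Str.slice country_code (some 1) none != value) then
      check_country_go value true rest
    else if PySem.Str.startswith country_code "!" &&
            (PySem.Str.slice country_code (some 1) none == value) then
      false
    else check_country_go value allowed rest

def check_country (result_filter : List String) (value : String) : Bool :=
  check_country_go value false result_filter

-- ===== PORT B =====
def check_country_alt (result_filter : List String) (value : String) : Bool :=
  let negated := (result_filter.filter (fun c => PySem.Str.startswith c "!")).map
      (fun c => PySem.Str.slice c (some 1) none)
  if negated.contains value then false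
  else result_filter.contains value || negated.any (fun c => c != value)

-- ===== PRECONDITION & SPEC =====
def Spec_check_country (result_filter : List String) (value : String) (out : Bool) : Prop := out = check_country_alt result_filter value
instance (result_filter : List String) (value : String) (out : Bool) : Decidable (Spec_check_country result_filter value out) := by unfold Spec_check_country; infer_instance

-- ===== CLAIM (what is proved, stated in full; the proofs are below) =====
def Claim_equal_check_country : Prop := ∀ (result_filter : List String) (value : String), Dom_check_country result_filter value → Spec_check_country result_filter value (check_country result_filter value)

-- ===== LEMMAS AND PROOFS =====

-- a negated entry can never equal its own tail: "!x"[1:] = "!x" is impossible (lengths differ)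
lemma tail_ne_self (c : String) (hneg : PySem.Chars.startswith c.toList ['!'] = true) :
    PySem.Str.slice c (some 1) none ≠ c := by
  rw [PySem.Chars.startswith_iff] at hneg
  intro he
  have hl : (PySem.Str.slice c (some 1) none).toList = c.toList.tail := by
    simp [PySem.List.slice_from_one]
  rw [he] at hl
  obtain ⟨t, ht⟩ := hneg
  rw [← ht] at hl
  simp at hl

-- characterisation of A's loop for any starting value of 'allowed'
lemma go_eq (value : String) (allowed : Bool) (rf : List String) :
    check_country_go value allowed rf =
      (let negated := (rf.filter (fun c => PySem.Str.startswith c "!")).map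
          (fun c => PySem.Str.slice c (some 1) none)
       if negated.contains value then false
       else allowed || rf.contains value || negated.any (fun c => c != value)) := by
  induction rf generalizing allowed with
  | nil => simp [check_country_go]
  | cons c rest ih =>
    simp only [check_country_go]
    by_cases hneg : PySem.Chars.startswith c.toList ['!'] = true
    · have hne := tail_ne_self c hneg
      by_cases htail : PySem.Str.slice c (some 1) none = value
      · -- branch 3 (or branch 1, impossible since tail ≠ c = value)
        have hcv : c ≠ value := fun h => hne (h ▸ htail)
        simp [hcv, hneg, htail]
      · by_cases hcv : c = value
        · -- branch 1: allowed := true; the new negated tail differs from value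
          simp [hcv, ih true]
          constructor
          · rintro ⟨a, ⟨h1, h2⟩, h3⟩; exact ⟨a, ⟨Or.inr h1, h2⟩, h3⟩
          · rintro ⟨a, ⟨h1 | h1, h2⟩, h3⟩
            · exact absurd h3 (by rw [h1, ← hcv]; exact hne)
            · exact ⟨a, ⟨h1, h2⟩, h3⟩
        · -- branch 2: allowed := true
          have h1 : (value == PySem.Str.slice c (some 1) none) = false := by
            simp; exact fun h => htail h.symm
          have h2 : (PySem.Str.slice c (some 1) none != value) = true := by simp [htail]
          simp [hcv, hneg, ih true, h1, h2]
    · by_cases hcv : c = value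
      · simp [hcv, ih true]
        constructor
        · rintro ⟨a, ⟨h1, h2⟩, h3⟩; exact ⟨a, ⟨Or.inr h1, h2⟩, h3⟩
        · rintro ⟨a, ⟨h1 | h1, h2⟩, h3⟩
          · exact absurd h2 (by rw [h1, ← hcv]; exact hneg)
          · exact ⟨a, ⟨h1, h2⟩, h3⟩
      · have hcv' : ¬value = c := fun h => hcv h.symm
        simp [hcv, hcv', hneg, ih allowed]

-- ===== VERDICT (by name: the statement is the Claim_ definition above) =====
theorem check_country_spec : Claim_equal_check_country := by
  intro rf v _
  unfold Spec_check_country check_country check_country_alt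
  simpa using go_eq v false rf
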